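-- pv_equiv track=rewrite | github.com/sherry1989/http | src/protocolUtils/harfile.py | MakeDefaultLowerHeaders
-- ===== SOURCE A (Python) =====
-- def MakeDefaultLowerHeaders(list_o_dicts, items_to_ignore=[]):
--   retval = {}
--   for kvdict in list_o_dicts:
--     key = kvdict["name"].lower()
--     val = kvdict["value"]
--     if key == "host":
--       key = ":host"
--     if key in items_to_ignore:
--       continue
--     if key in retval:
--       retval[key] = retval[key] + '\0' + val
--     else:
--       retval[key] = val
--   return retval
-- ===== SOURCE B (Python) =====
-- def MakeDefaultLowerHeaders(list_o_dicts, items_to_ignore=[]):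
--   pairs = []
--   for kvdict in list_o_dicts:
--     key = kvdict["name"].lower()
--     if key == "host":
--       key = ":host"
--     if key not in items_to_ignore:
--       pairs.append((key, kvdict["value"]))
--   return {key: '\0'.join(v for k, v in pairs if k == key) for key, _ in pairs}
-- ===== Notes on version B (the rewrite author's own statement) =====
-- stated objective: alternative
-- what changed: B keeps no dict during the scan: it first normalises the headers into a flat (key, value) pair list, then builds the result group-by style in a dict comprehension that, for each key, rescans the pair list (filter) and joins the matching values with '\0' in one go, instead of A's single pass that incrementally aggregates into a dict by string concatenation.
import Mathlib
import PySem

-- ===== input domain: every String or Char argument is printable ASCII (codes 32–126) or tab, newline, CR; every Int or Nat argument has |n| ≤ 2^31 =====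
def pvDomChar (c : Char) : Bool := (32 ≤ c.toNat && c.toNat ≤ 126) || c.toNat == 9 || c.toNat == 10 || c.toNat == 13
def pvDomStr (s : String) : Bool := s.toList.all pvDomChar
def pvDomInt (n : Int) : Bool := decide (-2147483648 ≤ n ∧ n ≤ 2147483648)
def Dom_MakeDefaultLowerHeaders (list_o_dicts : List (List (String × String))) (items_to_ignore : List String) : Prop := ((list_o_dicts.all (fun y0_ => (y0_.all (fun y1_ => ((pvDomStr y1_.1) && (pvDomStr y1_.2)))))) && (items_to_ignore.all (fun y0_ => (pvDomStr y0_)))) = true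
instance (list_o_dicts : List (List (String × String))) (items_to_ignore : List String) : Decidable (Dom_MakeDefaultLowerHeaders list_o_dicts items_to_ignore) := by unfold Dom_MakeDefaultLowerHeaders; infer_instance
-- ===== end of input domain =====

-- B replaces A's incremental dict aggregation by a two-stage group-by: first normalise the
-- headers into a (key, value) pair list, then build the result per distinct key by scanning
-- that list (filter + join) in a dict comprehension. Equivalence of the RETURN value only.

-- key = kvdict["name"].lower(); if key == "host": key = ":host"   (identical lines of A and B)
def pvKeyOf (kvdict : List (String × String)) : String :=
  let key0 := PySem.Str.lower (((PySem.Dict.mk kvdict).get? "name").getD "")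
  if key0 = "host" then ":host" else key0

-- kvdict["value"]
def pvValOf (kvdict : List (String × String)) : String :=
  ((PySem.Dict.mk kvdict).get? "value").getD ""

-- ===== PORT A =====
-- loop body of A's single for-loop
def pvStepA (items_to_ignore : List String) (retval : PySem.Dict String String)
    (kvdict : List (String × String)) : PySem.Dict String String :=
  let key := pvKeyOf kvdict
  let val := pvValOf kvdict
  if items_to_ignore.contains key then retval
  else if retval.contains key then
    retval.insert key (retval.getD key "" ++ "\x00" ++ val)
  else retval.insert key val

def MakeDefaultLowerHeaders (list_o_dicts : List (List (String × String))) (items_to_ignore : List String) : List (String × String) :=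
  (list_o_dicts.foldl (pvStepA items_to_ignore) PySem.Dict.empty).items

-- ===== PORT B =====
-- loop body of B's first loop: if key not in items_to_ignore: pairs.append((key, kvdict["value"]))
def pvPairsStep (items_to_ignore : List String) (pairs : List (String × String))
    (kvdict : List (String × String)) : List (String × String) :=
  let key := pvKeyOf kvdict
  if !(items_to_ignore.contains key) then pairs ++ [(key, pvValOf kvdict)] else pairs

def MakeDefaultLowerHeaders_alt (list_o_dicts : List (List (String × String))) (items_to_ignore : List String) : List (String × String) :=
  let pairs := list_o_dicts.foldl (pvPairsStep items_to_ignore) []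
  -- {key: '\0'.join(v for k, v in pairs if k == key) for key, _ in pairs}
  (pairs.foldl (fun d p =>
      d.insert p.1 (PySem.Str.join "\x00" ((pairs.filter (fun q => q.1 == p.1)).map Prod.snd)))
    PySem.Dict.empty).items

-- ===== PRECONDITION & SPEC =====
-- A raises KeyError when some kvdict lacks the key "name" or "value"; Pre_ excludes exactly those inputs.
def Pre_MakeDefaultLowerHeaders (list_o_dicts : List (List (String × String))) (items_to_ignore : List String) : Prop :=
  ∀ kvdict ∈ list_o_dicts,
    ((PySem.Dict.mk kvdict).get? "name").isSome = true ∧ ((PySem.Dict.mk kvdict).get? "value").isSome = true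

instance (list_o_dicts : List (List (String × String))) (items_to_ignore : List String) : Decidable (Pre_MakeDefaultLowerHeaders list_o_dicts items_to_ignore) := by
  unfold Pre_MakeDefaultLowerHeaders; infer_instance

def pvWitness_MakeDefaultLowerHeaders : (List (List (String × String))) × List String :=
  ([[("name", "Host"), ("value", "a")], [("name", "HOST"), ("value", "b")], [("name", "X"), ("value", "c")]], ["x"])

def Spec_MakeDefaultLowerHeaders (list_o_dicts : List (List (String × String))) (items_to_ignore : List String) (out : List (String × String)) : Prop := out = MakeDefaultLowerHeaders_alt list_o_dicts items_to_ignore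
instance (list_o_dicts : List (List (String × String))) (items_to_ignore : List String) (out : List (String × String)) : Decidable (Spec_MakeDefaultLowerHeaders list_o_dicts items_to_ignore out) := by unfold Spec_MakeDefaultLowerHeaders; infer_instance

-- ===== CLAIM (what is proved, stated in full; the proofs are below) =====
def Claim_equal_MakeDefaultLowerHeaders : Prop := ∀ (list_o_dicts : List (List (String × String))) (items_to_ignore : List String), Dom_MakeDefaultLowerHeaders list_o_dicts items_to_ignore → Pre_MakeDefaultLowerHeaders list_o_dicts items_to_ignore → Spec_MakeDefaultLowerHeaders list_o_dicts items_to_ignore (MakeDefaultLowerHeaders list_o_dicts items_to_ignore)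

-- ===== LEMMAS AND PROOFS =====

-- A's loop body once the ignore test has been passed (restriction of pvStepA to the kept pairs)
def pvStepA2 (d : PySem.Dict String String) (p : String × String) : PySem.Dict String String :=
  if d.contains p.1 then d.insert p.1 (d.getD p.1 "" ++ "\x00" ++ p.2) else d.insert p.1 p.2

-- grouping fold used only inside the proof
def pvStepG (g : PySem.Dict String (List String)) (p : String × String) : PySem.Dict String (List String) :=
  g.modify p.1 [] (· ++ [p.2])

def pvJoin (vs : List String) : String := PySem.Str.join "\x00" vs
def pvF (p : String × List String) : String × String := (p.1, pvJoin p.2)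

-- the kept, normalised pairs of the input
def pvPred (ign : List String) (kvdict : List (String × String)) : Bool := !(ign.contains (pvKeyOf kvdict))
def pvKV (kvdict : List (String × String)) : String × String := (pvKeyOf kvdict, pvValOf kvdict)

theorem pvPairs_eq (ign : List String) (ld : List (List (String × String))) :
    ld.foldl (pvPairsStep ign) [] = (ld.filter (pvPred ign)).map pvKV := by
  have h := PySem.List.foldl_append_if (l := ld) (acc := ([] : List (String × String)))
      (p := pvPred ign) (f := pvKV)
  simpa using h

theorem pvFoldA_eq (ign : List String) :
    ∀ (ld : List (List (String × String))) (d : PySem.Dict String String),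
      ld.foldl (pvStepA ign) d = ((ld.filter (pvPred ign)).map pvKV).foldl pvStepA2 d := by
  intro ld
  induction ld with
  | nil => intro d; rfl
  | cons kv rest ih =>
    intro d
    simp only [List.foldl_cons, List.filter_cons]
    cases hig : ign.contains (pvKeyOf kv) with
    | true =>
      have hp : pvPred ign kv = false := by unfold pvPred; rw [hig]; rfl
      have h1 : pvStepA ign d kv = d := by
        simp only [pvStepA]; rw [if_pos hig]
      rw [hp, h1, ih]
      simp
    | false =>
      have hp : pvPred ign kv = true := by unfold pvPred; rw [hig]; rfl
      have h1 : pvStepA ign d kv = pvStepA2 d (pvKV kv) := by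
        simp only [pvStepA, pvStepA2, pvKV]
        rw [if_neg (by rw [hig]; exact Bool.false_ne_true)]
      rw [hp, h1, ih]
      simp

theorem pvChars_join_append (sep v : List Char) :
    ∀ (vs : List (List Char)), vs ≠ [] →
      PySem.Chars.join sep (vs ++ [v]) = PySem.Chars.join sep vs ++ sep ++ v := by
  intro vs
  induction vs with
  | nil => intro h; exact absurd rfl h
  | cons p rest ih =>
    intro _
    cases rest with
    | nil => simp [PySem.Chars.join_cons_cons, PySem.Chars.join_singleton]
    | cons q rest' =>
      have hih := ih (by simp)
      simp only [List.cons_append] at hih ⊢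
      rw [PySem.Chars.join_cons_cons sep p q (rest' ++ [v]),
        PySem.Chars.join_cons_cons sep p q rest']
      rw [hih]
      simp [List.append_assoc]

theorem pvJoin_append (vs : List String) (v : String) (h : vs ≠ []) :
    pvJoin (vs ++ [v]) = pvJoin vs ++ "\x00" ++ v := by
  apply String.toList_inj.mp
  simp only [pvJoin, PySem.Str.toList_join, List.map_append, List.map_cons, List.map_nil,
    String.toList_append]
  exact pvChars_join_append _ _ _ (by cases vs <;> simp_all)

theorem pvJoin_singleton (v : String) : pvJoin [v] = v := by
  apply String.toList_inj.mp
  simp [pvJoin, PySem.Str.toList_join, PySem.Chars.join_singleton]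

theorem pvGet?_map (l : List (String × List String)) (k : String) :
    (PySem.Dict.mk (l.map pvF)).get? k = ((PySem.Dict.mk l).get? k).map pvJoin := by
  induction l with
  | nil => rfl
  | cons p rest ih =>
    simp only [List.map_cons, pvF]
    rw [PySem.Dict.get?_mk_cons, PySem.Dict.get?_mk_cons]
    by_cases hk : (p.1 == k) = true
    · simp [hk]
    · simp [hk, ih]

theorem pvContains_map (g : PySem.Dict String (List String)) (k : String) :
    (PySem.Dict.mk (g.items.map pvF)).contains k = g.contains k := by
  rw [PySem.Dict.contains_eq_isSome_get?, PySem.Dict.contains_eq_isSome_get?]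
  conv_rhs => rw [show g = PySem.Dict.mk g.items from rfl]
  rw [pvGet?_map]
  cases (PySem.Dict.mk g.items).get? k <;> rfl

theorem pvStep_rel (g : PySem.Dict String (List String)) (p : String × String)
    (hne : ∀ q ∈ g.items, q.2 ≠ []) :
    pvStepA2 (PySem.Dict.mk (g.items.map pvF)) p
      = PySem.Dict.mk ((pvStepG g p).items.map pvF) := by
  unfold pvStepA2 pvStepG
  obtain ⟨key, val⟩ := p
  dsimp only
  by_cases hc : g.contains key = true
  · -- key already present: A concatenates, the grouping fold appends to the per-key list
    obtain ⟨vs, hvs⟩ : ∃ vs, g.get? key = some vs := by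
      rw [PySem.Dict.contains_eq_isSome_get?] at hc
      exact Option.isSome_iff_exists.mp hc
    have hmem : (key, vs) ∈ g.items := PySem.Dict.mem_items_of_get?_eq_some g hvs
    have hvsne : vs ≠ [] := hne _ hmem
    have hgD : g.getD key [] = vs := PySem.Dict.getD_of_get?_eq_some g [] hvs
    have hrc : (PySem.Dict.mk (g.items.map pvF)).contains key = true := by
      rw [pvContains_map]; exact hc
    have hrD : (PySem.Dict.mk (g.items.map pvF)).getD key "" = pvJoin vs := by
      rw [PySem.Dict.getD_eq_get?_getD, pvGet?_map]
      rw [show (PySem.Dict.mk g.items).get? key = some vs from hvs]; rfl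
    rw [if_pos hrc, hrD]
    refine (PySem.Dict.ext ?_).symm
    rw [PySem.Dict.modify, hgD,
      PySem.Dict.items_insert_of_contains g _ hc,
      PySem.Dict.items_insert_of_contains _ _ hrc]
    rw [List.map_map, List.map_map]
    apply List.map_congr_left
    intro q _
    by_cases hq : (q.1 == key) = true
    · simp [Function.comp, pvF, hq, pvJoin_append vs val hvsne]
    · simp [Function.comp, pvF, hq]
  · -- fresh key: both append a new entry; join of a single value is the value
    have hrc : (PySem.Dict.mk (g.items.map pvF)).contains key = false := by
      rw [pvContains_map]; simp [hc]
    rw [if_neg (by simp [hrc])]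
    refine (PySem.Dict.ext ?_).symm
    rw [PySem.Dict.modify, PySem.Dict.getD_of_not_contains g [] (by simp [hc]),
      PySem.Dict.items_insert_of_not_contains g _ (by simp [hc]),
      PySem.Dict.items_insert_of_not_contains _ _ hrc]
    simp [pvF, pvJoin_singleton]

theorem pvStep_nodup (g : PySem.Dict String (List String)) (p : String × String)
    (hnd : g.keys.Nodup) : (pvStepG g p).keys.Nodup := by
  unfold pvStepG
  exact PySem.Dict.nodup_keys_insert _ _ _ hnd

theorem pvStep_ne (g : PySem.Dict String (List String)) (p : String × String)
    (hne : ∀ q ∈ g.items, q.2 ≠ []) :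
    ∀ q ∈ (pvStepG g p).items, q.2 ≠ [] := by
  unfold pvStepG
  intro q hq
  rw [PySem.Dict.modify, PySem.Dict.items_insert] at hq
  split at hq
  · obtain ⟨r, hr, hrq⟩ := List.mem_map.mp hq
    by_cases hr1 : (r.1 == p.1) = true
    · rw [if_pos hr1] at hrq; subst hrq; simp
    · rw [if_neg hr1] at hrq; exact hrq ▸ hne r hr
  · rcases List.mem_append.mp hq with h | h
    · exact hne q h
    · simp only [List.mem_singleton] at h; subst h; simp

theorem pvLoop_rel :
    ∀ (P : List (String × String)) (g : PySem.Dict String (List String)),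
      g.keys.Nodup → (∀ q ∈ g.items, q.2 ≠ []) →
      P.foldl pvStepA2 (PySem.Dict.mk (g.items.map pvF))
        = PySem.Dict.mk ((P.foldl pvStepG g).items.map pvF) := by
  intro P
  induction P with
  | nil => intro g _ _; rfl
  | cons p rest ih =>
    intro g hnd hne
    simp only [List.foldl_cons]
    rw [pvStep_rel g p hne]
    exact ih _ (pvStep_nodup g p hnd) (pvStep_ne g p hne)

-- characterisation of the grouping fold, started from empty
theorem pvG_keys (P : List (String × String)) :
    (P.foldl pvStepG PySem.Dict.empty).keys = PySem.Set.ofList (P.map Prod.fst) := by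
  have h := PySem.Dict.keys_foldl_modify_key (l := P) (key := Prod.fst)
      (d0 := ([] : List String)) (f := fun (_ : PySem.Dict String (List String)) (p : String × String) (vs : List String) => vs ++ [p.2])
      (d := PySem.Dict.empty)
  simpa [pvStepG, PySem.Set.update_nil_left] using h

theorem pvG_nodup (P : List (String × String)) :
    (P.foldl pvStepG PySem.Dict.empty).keys.Nodup := by
  rw [pvG_keys]; exact PySem.Set.nodup_ofList _

theorem pvG_getD (P : List (String × String)) (k : String) :
    (P.foldl pvStepG PySem.Dict.empty).getD k []
      = (P.filter (fun q => q.1 == k)).map Prod.snd := by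
  have h := PySem.Dict.getD_foldl_modify_append (l := P) (d := PySem.Dict.empty) (c := k)
  simpa [pvStepG] using h

-- the insert fold of B's comprehension, whose value depends only on the key
theorem pvB_get? (v : String → String) (k : String) :
    ∀ (P : List (String × String)) (d : PySem.Dict String String),
      (P.foldl (fun d p => d.insert p.1 (v p.1)) d).get? k
        = if k ∈ P.map Prod.fst then some (v k) else d.get? k := by
  intro P
  induction P with
  | nil => intro d; simp
  | cons p rest ih =>
    intro d
    simp only [List.foldl_cons, List.map_cons, List.mem_cons]
    rw [ih]
    by_cases hr : k ∈ rest.map Prod.fst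
    · simp [hr]
    · by_cases hk : k = p.1
      · simp [hk, PySem.Dict.get?_insert_self]
      · simp [hr, hk, PySem.Dict.get?_insert_of_ne _ _ hk]

theorem pvB_items (v : String → String) (P : List (String × String)) :
    (P.foldl (fun d p => d.insert p.1 (v p.1)) PySem.Dict.empty).items
      = (PySem.Set.ofList (P.map Prod.fst)).map (fun k => (k, v k)) := by
  have hkeys : (P.foldl (fun d p => d.insert p.1 (v p.1)) PySem.Dict.empty).keys
      = PySem.Set.ofList (P.map Prod.fst) := by
    have h := PySem.Dict.keys_foldl_insert_key (l := P) (key := Prod.fst)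
        (f := fun (_ : PySem.Dict String String) (p : String × String) => v p.1)
        (d := PySem.Dict.empty)
    simpa [PySem.Set.update_nil_left] using h
  have hnd : (P.foldl (fun d p => d.insert p.1 (v p.1)) PySem.Dict.empty).keys.Nodup := by
    rw [hkeys]; exact PySem.Set.nodup_ofList _
  rw [PySem.Dict.items_eq_map_keys _ hnd "", hkeys]
  apply List.map_congr_left
  intro k hk
  have hk' : k ∈ P.map Prod.fst := (PySem.Set.mem_ofList _ _).mp hk
  simp [PySem.Dict.getD_eq_get?_getD, pvB_get?, hk']

-- ===== VERDICT (by name: the statement is the Claim_ definition above) =====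
theorem MakeDefaultLowerHeaders_spec : Claim_equal_MakeDefaultLowerHeaders := by
  intro ld ign _ _
  show (ld.foldl (pvStepA ign) PySem.Dict.empty).items = MakeDefaultLowerHeaders_alt ld ign
  unfold MakeDefaultLowerHeaders_alt
  rw [pvPairs_eq]
  set P : List (String × String) := (ld.filter (pvPred ign)).map pvKV with hP
  -- A's fold over the input equals the restricted fold over the kept pairs, then the grouping view
  rw [pvFoldA_eq, ← hP]
  have hA : P.foldl pvStepA2 PySem.Dict.empty
      = PySem.Dict.mk ((P.foldl pvStepG PySem.Dict.empty).items.map pvF) :=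
    pvLoop_rel P PySem.Dict.empty PySem.Dict.nodup_keys_empty (by intro q hq; cases hq)
  rw [hA]
  -- both sides are the distinct keys, in first-appearance order, paired with the joined values
  show ((P.foldl pvStepG PySem.Dict.empty).items.map pvF)
      = (P.foldl (fun d p =>
          d.insert p.1 (PySem.Str.join "\x00" ((P.filter (fun q => q.1 == p.1)).map Prod.snd)))
        PySem.Dict.empty).items
  rw [pvB_items (fun k => PySem.Str.join "\x00" ((P.filter (fun q => q.1 == k)).map Prod.snd)) P]
  rw [PySem.Dict.items_eq_map_keys _ (pvG_nodup P) [], pvG_keys, List.map_map]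
  apply List.map_congr_left
  intro k _
  simp [Function.comp, pvF, pvJoin, pvG_getD]
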